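-- pv_equiv track=rewrite | github.com/MRXML/Hwork | rectengle func.py | rectangle
-- ===== SOURCE A (Python) =====
-- def rectangle(x, y):
--     r = ''
--     for i in range(x):
--         if i == 0 or i == x - 1:
--             r += "*" * y + '*\n'
--         else:
--             r += "*" + ' ' * (y - 1) + '*\n'
--     return r
-- ===== SOURCE B (Python) =====
-- def rectangle(x, y):
--     if x <= 0:
--         return ""
--     top = "*" * y + "*\n"
--     if x == 1:
--         return top
--     mid = "*" + " " * (y - 1) + "*\n"
--     return top + mid * (x - 2) + top
-- ===== Notes on version B (the rewrite author's own statement) =====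
-- stated objective: simpler
-- what changed: Replaced the per-row loop with a closed form: the border and interior row strings are built once and the body is assembled by string multiplication (top + mid*(x-2) + top), with the empty and single-row cases handled up front.
import Mathlib
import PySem

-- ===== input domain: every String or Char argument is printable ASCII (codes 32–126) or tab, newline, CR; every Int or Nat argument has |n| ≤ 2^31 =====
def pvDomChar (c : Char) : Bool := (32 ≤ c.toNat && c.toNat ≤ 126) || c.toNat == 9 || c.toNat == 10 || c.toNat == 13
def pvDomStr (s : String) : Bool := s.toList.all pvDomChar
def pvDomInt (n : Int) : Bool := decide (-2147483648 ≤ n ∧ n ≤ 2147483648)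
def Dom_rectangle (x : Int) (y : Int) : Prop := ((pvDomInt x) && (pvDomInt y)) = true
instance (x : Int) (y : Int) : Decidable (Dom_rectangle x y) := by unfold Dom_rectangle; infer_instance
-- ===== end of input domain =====

-- B replaces A's per-row loop and branch by building the border and interior rows once
-- and assembling the result with string multiplication (simpler; same output).

-- ===== PORT A =====
-- the border row "*" * y + '*\n'  (built on List Char; String.append is kernel-opaque)
def rowTop (y : Int) : List Char := PySem.List.pyRepeat ['*'] y ++ ['*', '\n']
-- the interior row "*" + ' ' * (y - 1) + '*\n'
def rowMid (y : Int) : List Char := ['*'] ++ PySem.List.pyRepeat [' '] (y - 1) ++ ['*', '\n']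

def rectangle (x : Int) (y : Int) : String :=
  String.ofList ((PySem.List.pyRange 0 x 1).foldl
    (fun r i => if i = 0 ∨ i = x - 1 then r ++ rowTop y else r ++ rowMid y) [])

-- ===== PORT B =====
def rectangle_alt (x : Int) (y : Int) : String :=
  if x ≤ 0 then ""
  else
    let top := rowTop y
    if x = 1 then String.ofList top
    else String.ofList (top ++ PySem.List.pyRepeat (rowMid y) (x - 2) ++ top)

-- ===== PRECONDITION & SPEC =====
def Spec_rectangle (x : Int) (y : Int) (out : String) : Prop := out = rectangle_alt x y
instance (x : Int) (y : Int) (out : String) : Decidable (Spec_rectangle x y out) := by unfold Spec_rectangle; infer_instance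

-- ===== CLAIM (what is proved, stated in full; the proofs are below) =====
def Claim_equal_rectangle : Prop := ∀ (x : Int) (y : Int), Dom_rectangle x y → Spec_rectangle x y (rectangle x y)

-- ===== LEMMAS AND PROOFS =====

-- A's loop body, with the append factored out of the branch
lemma rect_foldl_eq_flatMap (x y : Int) :
    ((PySem.List.pyRange 0 x 1).foldl
      (fun r i => if i = 0 ∨ i = x - 1 then r ++ rowTop y else r ++ rowMid y) []) =
    (PySem.List.pyRange 0 x 1).flatMap (fun i => if i = 0 ∨ i = x - 1 then rowTop y else rowMid y) := by
  have h : (fun (r : List Char) (i : Int) => if i = 0 ∨ i = x - 1 then r ++ rowTop y else r ++ rowMid y)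
      = fun r i => r ++ (if i = 0 ∨ i = x - 1 then rowTop y else rowMid y) := by
    funext r i; split <;> rfl
  rw [h, PySem.List.foldl_append_eq_flatMap]
  simp

-- interior rows: every i in range(1, x-1) produces the interior row
lemma rect_mid_flatMap (x y : Int) :
    (PySem.List.pyRange 1 (x - 1) 1).flatMap
      (fun i => if i = 0 ∨ i = x - 1 then rowTop y else rowMid y) =
    PySem.List.pyRepeat (rowMid y) (x - 2) := by
  have hmap : (PySem.List.pyRange 1 (x - 1) 1).map
      (fun i => if i = 0 ∨ i = x - 1 then rowTop y else rowMid y) =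
      (PySem.List.pyRange 1 (x - 1) 1).map (fun _ => rowMid y) := by
    apply List.map_congr_left
    intro i hi
    rw [PySem.List.mem_pyRange_one] at hi
    rw [if_neg]
    omega
  rw [List.flatMap_def, hmap, List.map_const', PySem.List.length_pyRange_one,
    PySem.List.pyRepeat]
  congr 2
  omega

theorem rectangle_spec_aux (x y : Int) : rectangle x y = rectangle_alt x y := by
  unfold rectangle rectangle_alt
  rw [rect_foldl_eq_flatMap]
  by_cases h0 : x ≤ 0
  · rw [PySem.List.pyRange_one_eq_nil h0, if_pos h0]
    rfl
  · rw [if_neg h0]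
    by_cases h1 : x = 1
    · subst h1
      rw [show (PySem.List.pyRange 0 1 1) = [0] from PySem.List.pyRange_one_singleton 0]
      simp
    · rw [if_neg h1]
      have h2 : 2 ≤ x := by omega
      rw [PySem.List.pyRange_one_append 0 1 x (by omega) (by omega),
        PySem.List.pyRange_one_append 1 (x - 1) x (by omega) (by omega),
        show (PySem.List.pyRange 0 1 1) = [0] from PySem.List.pyRange_one_singleton 0,
        show (PySem.List.pyRange (x - 1) x 1) = [x - 1] by
          rw [PySem.List.pyRange_one_cons (by omega : x - 1 < x),
            PySem.List.pyRange_one_eq_nil (by omega : x ≤ x - 1 + 1)]]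
      rw [List.flatMap_append, List.flatMap_append, rect_mid_flatMap]
      simp

-- ===== VERDICT (by name: the statement is the Claim_ definition above) =====
theorem rectangle_spec : Claim_equal_rectangle := by
  intro x y _
  exact rectangle_spec_aux x y
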